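-- pv_equiv track=rewrite | github.com/Skiffy106/icpc-2024 | edited/a09.py | bf_solve
-- ===== SOURCE A (Python) =====
-- def bf_solve(s):
--     tot = 0
--     n = len(s)
--     for i in range(1, n+1):
--         for j in range(i, n+1):
--             if s[i-1] == s[j-1]: continue
--             tot += pow(j-i, 2)
--     return int(tot % (pow(10, 9) + 7))
-- ===== SOURCE B (Python) =====
-- def bf_solve(s):
--     MOD = 10**9 + 7
--     n = len(s)
--     total = 0
--     for d in range(1, n):
--         total += d * d * (n - d)
--     stats = {}
--     equal = 0
--     for j, c in enumerate(s):
--         cnt, sp, sp2 = stats.get(c, (0, 0, 0))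
--         equal += cnt * j * j - 2 * j * sp + sp2
--         stats[c] = (cnt + 1, sp + j, sp2 + j * j)
--     return (total - equal) % MOD
-- ===== Notes on version B (the rewrite author's own statement) =====
-- stated objective: faster
-- what changed: Replaced the O(n^2) scan over all index pairs by an O(n) pass: a closed-style loop sums (j-i)^2 over ALL pairs by distance, and a single streaming pass with per-character running (count, sum of positions, sum of squared positions) subtracts the equal-character pairs' contribution.
import Mathlib
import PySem

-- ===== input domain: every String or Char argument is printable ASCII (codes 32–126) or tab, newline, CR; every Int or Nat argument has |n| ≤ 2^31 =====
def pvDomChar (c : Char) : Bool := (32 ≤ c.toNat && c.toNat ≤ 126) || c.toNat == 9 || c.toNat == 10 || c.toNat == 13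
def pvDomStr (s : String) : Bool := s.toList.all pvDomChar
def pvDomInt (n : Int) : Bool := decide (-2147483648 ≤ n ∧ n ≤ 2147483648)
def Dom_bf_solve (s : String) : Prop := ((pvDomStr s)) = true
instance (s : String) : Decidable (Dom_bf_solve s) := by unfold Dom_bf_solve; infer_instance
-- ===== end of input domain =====

-- B replaces A's quadratic all-index-pairs scan by a single linear pass: the sum of (j-i)^2 over
-- ALL pairs is accumulated per distance, and the equal-character pairs' share is subtracted using
-- per-character running (count, position sum, squared-position sum) statistics.

-- ===== PORT A =====
def bf_solve (s : String) : Int :=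
  let n : Int := PySem.Str.len s
  let tot : Int :=
    (PySem.List.pyRange 1 (n + 1) 1).foldl (fun tot i =>
      (PySem.List.pyRange i (n + 1) 1).foldl (fun tot j =>
        if PySem.Str.pyGet? s (i - 1) = PySem.Str.pyGet? s (j - 1) then tot
        else tot + (j - i) ^ 2) tot) 0
  PySem.Int.mod tot (10 ^ 9 + 7)

-- ===== PORT B =====
-- loop body of B's streaming pass (state: per-character stats dict, running equal-pair sum)
def bfAltStep (st : PySem.Dict Char (Int × Int × Int) × Int) (jc : Int × Char) :
    PySem.Dict Char (Int × Int × Int) × Int :=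
  let (cnt, sp, sp2) := st.1.getD jc.2 (0, 0, 0)
  (st.1.insert jc.2 (cnt + 1, sp + jc.1, sp2 + jc.1 * jc.1),
   st.2 + cnt * jc.1 * jc.1 - 2 * jc.1 * sp + sp2)

def bf_solve_alt (s : String) : Int :=
  let M : Int := 10 ^ 9 + 7
  let n : Int := PySem.Str.len s
  let total : Int := (PySem.List.pyRange 1 n 1).foldl (fun t d => t + d * d * (n - d)) 0
  let st := (PySem.List.enumerate s.toList 0).foldl bfAltStep (PySem.Dict.empty, 0)
  PySem.Int.mod (total - st.2) M

-- ===== PRECONDITION & SPEC =====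
def Spec_bf_solve (s : String) (out : Int) : Prop := out = bf_solve_alt s
instance (s : String) (out : Int) : Decidable (Spec_bf_solve s out) := by unfold Spec_bf_solve; infer_instance

-- ===== CLAIM (what is proved, stated in full; the proofs are below) =====
def Claim_equal_bf_solve : Prop := ∀ (s : String), Dom_bf_solve s → Spec_bf_solve s (bf_solve s)

-- ===== LEMMAS AND PROOFS =====

theorem pvMapRangeSucc {γ : Type} (a b : Int) (f : Int → γ) :
    (PySem.List.pyRange (a + 1) (b + 1) 1).map f
      = (PySem.List.pyRange a b 1).map (fun x => f (x + 1)) := by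
  rw [PySem.List.pyRange_one, PySem.List.pyRange_one]
  have h : (b + 1 - (a + 1)) = b - a := by ring
  rw [h, List.map_map, List.map_map]
  apply List.map_congr_left
  intro k _
  simp only [Function.comp]
  congr 1
  ring


theorem pvSixQ (n : Nat) :
    6 * ((PySem.List.pyRange 1 (n : Int) 1).map (fun d => d * d)).sum
      = ((n : Int) - 1) * n * (2 * n - 1) := by
  induction n with
  | zero => simp [PySem.List.pyRange_one_eq_nil (by omega : (0:Int) ≤ 1)]
  | succ n ih =>
    rcases Nat.eq_zero_or_pos n with h | h
    · subst h
      simp [PySem.List.pyRange_one_eq_nil (le_refl (1:Int))]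
    · have hb : ((n + 1 : Nat) : Int) = (n : Int) + 1 := by push_cast; ring
      rw [hb, PySem.List.pyRange_one_succ_right (by omega : (1:Int) ≤ (n:Int))]
      rw [List.map_append, List.sum_append]
      simp only [List.map_cons, List.map_nil, List.sum_cons, List.sum_nil]
      linear_combination ih

theorem pvSixR (n : Nat) :
    6 * ((PySem.List.pyRange 1 ((n : Int) + 1) 1).map (fun i => ((n : Int) + 1 - i) ^ 2)).sum
      = (n : Int) * (n + 1) * (2 * n + 1) := by
  induction n with
  | zero => simp [PySem.List.pyRange_one_eq_nil (le_refl (1:Int))]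
  | succ n ih =>
    have hc : ((n + 1 : Nat) : Int) + 1 = ((n : Int) + 1) + 1 := by push_cast; ring
    rw [hc, PySem.List.pyRange_one_cons (by omega : (1:Int) < (n:Int) + 1 + 1)]
    simp only [List.map_cons, List.sum_cons]
    have h2 : (PySem.List.pyRange (1 + 1) ((n : Int) + 1 + 1) 1).map
        (fun i => ((n : Int) + 1 + 1 - i) ^ 2)
        = (PySem.List.pyRange 1 ((n : Int) + 1) 1).map (fun x => ((n : Int) + 1 - x) ^ 2) := by
      rw [pvMapRangeSucc 1 ((n : Int) + 1) (fun i => ((n : Int) + 1 + 1 - i) ^ 2)]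
      apply List.map_congr_left
      intro x _
      ring
    rw [h2]
    push_cast
    linear_combination ih

def pvAllT (n : Int) : Int :=
  ((PySem.List.pyRange 1 (n + 1) 1).map (fun i =>
    ((PySem.List.pyRange i (n + 1) 1).map (fun j => (j - i) ^ 2)).sum)).sum

def pvTotB (n : Int) : Int :=
  ((PySem.List.pyRange 1 n 1).map (fun d => d * d * (n - d))).sum

theorem pvSumAdd {α : Type} (l : List α) (f g : α → Int) :
    (l.map (fun x => f x + g x)).sum = (l.map f).sum + (l.map g).sum := by
  induction l with
  | nil => simp
  | cons x t ih => simp [ih]; ring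

theorem pvTwelveTotB (n : Nat) : 12 * pvTotB (n : Int) = (n : Int) ^ 4 - (n : Int) ^ 2 := by
  induction n with
  | zero => simp [pvTotB, PySem.List.pyRange_one_eq_nil (by omega : (0:Int) ≤ 1)]
  | succ n ih =>
    rcases Nat.eq_zero_or_pos n with h | h
    · subst h
      simp [pvTotB, PySem.List.pyRange_one_eq_nil (le_refl (1:Int))]
    · unfold pvTotB
      have hb : ((n + 1 : Nat) : Int) = (n : Int) + 1 := by push_cast; ring
      rw [hb, PySem.List.pyRange_one_succ_right (by omega : (1:Int) ≤ (n:Int))]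
      rw [List.map_append, List.sum_append]
      simp only [List.map_cons, List.map_nil, List.sum_cons, List.sum_nil]
      have hsplit : (PySem.List.pyRange 1 (n : Int) 1).map (fun d => d * d * ((n:Int) + 1 - d))
          = (PySem.List.pyRange 1 (n : Int) 1).map (fun d => d * d * ((n:Int) - d) + d * d) := by
        apply List.map_congr_left; intro d _; ring
      rw [hsplit, pvSumAdd]
      have hq := pvSixQ n
      unfold pvTotB at ih
      have := pvSumAdd (PySem.List.pyRange 1 (n : Int) 1) (fun d => d * d * ((n:Int) - d)) (fun d => d * d)
      linarith [ih, hq, this]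

theorem pvTwelveAllT (n : Nat) : 12 * pvAllT (n : Int) = (n : Int) ^ 4 - (n : Int) ^ 2 := by
  induction n with
  | zero =>
    simp [pvAllT, PySem.List.pyRange_one_eq_nil (le_refl (1:Int))]
  | succ n ih =>
    unfold pvAllT
    have hb : ((n + 1 : Nat) : Int) + 1 = ((n : Int) + 1) + 1 := by push_cast; ring
    rw [hb, PySem.List.pyRange_one_succ_right (show (1:Int) ≤ (n:Int) + 1 by omega)]
    rw [List.map_append, List.sum_append]
    simp only [List.map_cons, List.map_nil, List.sum_cons, List.sum_nil]
    rw [PySem.List.pyRange_one_singleton]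
    have hin : (PySem.List.pyRange 1 ((n:Int)+1) 1).map
          (fun i => ((PySem.List.pyRange i ((n:Int)+1+1) 1).map (fun j => (j-i)^2)).sum)
        = (PySem.List.pyRange 1 ((n:Int)+1) 1).map
          (fun i => ((PySem.List.pyRange i ((n:Int)+1) 1).map (fun j => (j-i)^2)).sum
            + ((n:Int)+1-i)^2) := by
      apply List.map_congr_left
      intro i hi
      rw [PySem.List.mem_pyRange_one] at hi
      rw [PySem.List.pyRange_one_succ_right (show i ≤ (n:Int)+1 by omega)]
      simp [List.sum_append]
    rw [hin, pvSumAdd (PySem.List.pyRange 1 ((n:Int)+1) 1)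
      (fun i => ((PySem.List.pyRange i ((n:Int)+1) 1).map (fun j => (j-i)^2)).sum)
      (fun i => ((n:Int)+1-i)^2)]
    unfold pvAllT at ih
    have hr := pvSixR n
    simp only [List.map_cons, List.map_nil, List.sum_cons, List.sum_nil]
    push_cast
    linarith [ih, hr]

theorem pvSumConst {α : Type} (l : List α) (k : Int) :
    (l.map (fun _ => k)).sum = l.length * k := by
  induction l with
  | nil => simp
  | cons x t ih => simp [ih]; ring

theorem pvSumIteFilter {α : Type} (l : List α) (p : α → Bool) (f : α → Int) :
    (l.map (fun x => if p x then f x else 0)).sum = ((l.filter p).map f).sum := by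
  induction l with
  | nil => simp
  | cons x t ih =>
    by_cases h : p x <;> simp [h, ih]

def pvEqT (l : List Char) : Int :=
  ((PySem.List.pyRange 1 ((l.length : Int) + 1) 1).map (fun i =>
    ((PySem.List.pyRange i ((l.length : Int) + 1) 1).map (fun j =>
      if PySem.List.pyGet? l (i - 1) = PySem.List.pyGet? l (j - 1) then (j - i) ^ 2 else 0)).sum)).sum

def pvPos (l : List Char) (c : Char) : List Int :=
  (((PySem.List.enumerate l 0).filter (fun p => p.2 == c))).map (·.1)

theorem pvSumMul {α : Type} (l : List α) (a : Int) (f : α → Int) :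
    (l.map (fun x => a * f x)).sum = a * (l.map f).sum := by
  induction l with
  | nil => simp
  | cons x t ih => simp [ih]; ring

theorem pvSumSub {α : Type} (l : List α) (f g : α → Int) :
    (l.map (fun x => f x - g x)).sum = (l.map f).sum - (l.map g).sum := by
  induction l with
  | nil => simp
  | cons x t ih => simp [ih]; ring

theorem pvMapRangeSucc0 {γ : Type} (b : Int) (f : Int → γ) :
    (PySem.List.pyRange 1 (b + 1) 1).map f
      = (PySem.List.pyRange 0 b 1).map (fun x => f (x + 1)) := by
  have h := pvMapRangeSucc 0 b f
  norm_num at h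
  exact h

theorem pvExtraSum (l : List Char) (c : Char) :
    ((PySem.List.pyRange 1 ((l.length : Int) + 1) 1).map (fun i =>
        if PySem.List.pyGet? l (i - 1) = some c then ((l.length : Int) + 1 - i) ^ 2 else 0)).sum
      = ((pvPos l c).length : Int) * l.length * l.length
        - 2 * l.length * (pvPos l c).sum + ((pvPos l c).map (fun x => x * x)).sum := by
  rw [pvMapRangeSucc0 (l.length : Int)
    (fun i => if PySem.List.pyGet? l (i - 1) = some c then ((l.length : Int) + 1 - i) ^ 2 else 0)]
  have hcg : (PySem.List.pyRange 0 (l.length : Int) 1).map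
        (fun x => if PySem.List.pyGet? l (x + 1 - 1) = some c
          then ((l.length : Int) + 1 - (x + 1)) ^ 2 else 0)
      = (PySem.List.enumerate l 0).map
        (fun p => if p.2 == c then ((l.length : Int) - p.1) * ((l.length : Int) - p.1) else 0) := by
    rw [PySem.List.enumerate_eq_map_pyRange l 'a', List.map_map]
    simp only [PySem.List.len_eq]
    apply List.map_congr_left
    intro x hx
    rw [PySem.List.mem_pyRange_one] at hx
    have hx1 : x + 1 - 1 = x := by ring
    rw [hx1]
    rw [PySem.List.pyGet?_eq_some_getElem l (by omega : (0:Int) ≤ x) (by exact hx.2)]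
    simp only [Function.comp]
    rw [PySem.List.pyGetD_eq_getElem l 'a' (by omega : (0:Int) ≤ x) (by exact hx.2)]
    by_cases h : l[x.toNat] = c
    · simp [h]; ring
    · simp [h]
  rw [hcg, pvSumIteFilter (PySem.List.enumerate l 0) (fun p => p.2 == c)
    (fun p => ((l.length : Int) - p.1) * ((l.length : Int) - p.1))]
  unfold pvPos
  rw [List.map_map]
  have hexp : (((PySem.List.enumerate l 0).filter (fun p => p.2 == c)).map
        (fun p => ((l.length : Int) - p.1) * ((l.length : Int) - p.1)))
      = (((PySem.List.enumerate l 0).filter (fun p => p.2 == c)).map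
        (fun p => ((l.length : Int) * l.length - 2 * l.length * p.1) + p.1 * p.1)) := by
    apply List.map_congr_left; intro p _; ring
  rw [hexp, pvSumAdd, pvSumSub, pvSumConst,
    pvSumMul ((PySem.List.enumerate l 0).filter (fun p => p.2 == c))
      (2 * (l.length : Int)) (fun p => p.1)]
  simp only [List.length_map, Function.comp_def]
  ring

theorem pvGetAppendLt (l : List Char) (c : Char) (t : Int) (h0 : 0 ≤ t) (h1 : t < (l.length : Int)) :
    PySem.List.pyGet? (l ++ [c]) t = PySem.List.pyGet? l t := by
  rw [PySem.List.pyGet?_of_nonneg _ h0, PySem.List.pyGet?_of_nonneg _ h0]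
  exact List.getElem?_append_left (by omega)

theorem pvEqTAppend (l : List Char) (c : Char) :
    pvEqT (l ++ [c])
      = pvEqT l + ((pvPos l c).length : Int) * l.length * l.length
        - 2 * l.length * (pvPos l c).sum + ((pvPos l c).map (fun x => x * x)).sum := by
  unfold pvEqT
  simp only [List.length_append, List.length_cons, List.length_nil]
  push_cast
  rw [PySem.List.pyRange_one_succ_right (show (1:Int) ≤ (l.length : Int) + 1 by omega)]
  rw [List.map_append, List.sum_append]
  simp only [List.map_cons, List.map_nil, List.sum_cons, List.sum_nil]
  rw [PySem.List.pyRange_one_singleton]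
  have hmain : (PySem.List.pyRange 1 ((l.length : Int) + 1) 1).map
        (fun i => ((PySem.List.pyRange i ((l.length : Int) + 1 + 1) 1).map (fun j =>
          if PySem.List.pyGet? (l ++ [c]) (i - 1) = PySem.List.pyGet? (l ++ [c]) (j - 1)
          then (j - i) ^ 2 else 0)).sum)
      = (PySem.List.pyRange 1 ((l.length : Int) + 1) 1).map
        (fun i => ((PySem.List.pyRange i ((l.length : Int) + 1) 1).map (fun j =>
          if PySem.List.pyGet? l (i - 1) = PySem.List.pyGet? l (j - 1)
          then (j - i) ^ 2 else 0)).sum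
          + (if PySem.List.pyGet? l (i - 1) = some c then ((l.length : Int) + 1 - i) ^ 2 else 0)) := by
    apply List.map_congr_left
    intro i hi
    rw [PySem.List.mem_pyRange_one] at hi
    rw [PySem.List.pyRange_one_succ_right (show i ≤ (l.length : Int) + 1 by omega)]
    rw [List.map_append, List.sum_append]
    simp only [List.map_cons, List.map_nil, List.sum_cons, List.sum_nil, add_zero]
    congr 1
    · apply congrArg
      apply List.map_congr_left
      intro j hj
      rw [PySem.List.mem_pyRange_one] at hj
      rw [pvGetAppendLt l c (i - 1) (by omega) (by omega),
          pvGetAppendLt l c (j - 1) (by omega) (by omega)]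
    · have h1 : (l.length : Int) + 1 - 1 = (l.length : Int) := by ring
      rw [h1, pvGetAppendLt l c (i - 1) (by omega) (by omega),
          PySem.List.pyGet?_append_length l [] c]
  rw [hmain, pvSumAdd (PySem.List.pyRange 1 ((l.length : Int) + 1) 1)
      (fun i => ((PySem.List.pyRange i ((l.length : Int) + 1) 1).map (fun j =>
          if PySem.List.pyGet? l (i - 1) = PySem.List.pyGet? l (j - 1)
          then (j - i) ^ 2 else 0)).sum)
      (fun i => if PySem.List.pyGet? l (i - 1) = some c then ((l.length : Int) + 1 - i) ^ 2 else 0),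
    pvExtraSum]
  simp only [List.map_cons, List.map_nil, List.sum_cons, List.sum_nil, sub_self]
  norm_num
  ring

theorem pvPosAppend (l : List Char) (c c' : Char) :
    pvPos (l ++ [c]) c'
      = pvPos l c' ++ (if c = c' then [(l.length : Int)] else []) := by
  unfold pvPos
  rw [PySem.List.enumerate_append l [c] 0, PySem.List.enumerate_cons, PySem.List.enumerate_nil]
  rw [List.filter_append, List.map_append]
  by_cases h : c = c' <;> simp [h]

theorem pvEqTNil : pvEqT [] = 0 := by
  simp [pvEqT, PySem.List.pyRange_one_eq_nil (le_refl (1:Int))]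

theorem pvFoldInv (l : List Char) :
    (∀ c : Char,
      ((PySem.List.enumerate l 0).foldl bfAltStep (PySem.Dict.empty, 0)).1.getD c (0, 0, 0)
        = (((pvPos l c).length : Int), (pvPos l c).sum, ((pvPos l c).map (fun x => x * x)).sum))
    ∧ ((PySem.List.enumerate l 0).foldl bfAltStep (PySem.Dict.empty, 0)).2 = pvEqT l := by
  induction l using List.reverseRecOn with
  | nil =>
    constructor
    · intro c
      simp [PySem.List.enumerate_nil, pvPos, PySem.Dict.getD_empty]
    · simp [PySem.List.enumerate_nil, pvEqTNil]
  | append_singleton l c ih =>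
    obtain ⟨ihD, ihE⟩ := ih
    rw [PySem.List.enumerate_append l [c] 0, PySem.List.enumerate_cons, PySem.List.enumerate_nil,
        List.foldl_append]
    simp only [List.foldl_cons, List.foldl_nil, zero_add]
    set prev := (PySem.List.enumerate l 0).foldl bfAltStep (PySem.Dict.empty, 0) with hprev
    have hstep : bfAltStep prev ((l.length : Int), c)
        = (prev.1.insert c
            (((pvPos l c).length : Int) + 1, (pvPos l c).sum + (l.length : Int),
              ((pvPos l c).map (fun x => x * x)).sum + (l.length : Int) * (l.length : Int)),
           pvEqT l + ((pvPos l c).length : Int) * (l.length : Int) * (l.length : Int)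
             - 2 * (l.length : Int) * (pvPos l c).sum
             + ((pvPos l c).map (fun x => x * x)).sum) := by
      unfold bfAltStep
      rw [ihD c, ihE]
    rw [hstep]
    constructor
    · intro c'
      rw [PySem.Dict.getD_insert]
      rw [pvPosAppend l c c']
      by_cases h : c' = c
      · subst h
        simp [List.sum_append]
      · have h2 : ¬ (c = c') := fun hh => h hh.symm
        simp [h, h2, ihD c']
    · rw [pvEqTAppend l c]

theorem pvChGet (l : List Char) (i : Int) : PySem.Chars.pyGet? l i = PySem.List.pyGet? l i := rfl

theorem pvAEq (s : String) :
    bf_solve s = PySem.Int.mod (pvAllT (s.toList.length : Int) - pvEqT s.toList) (10 ^ 9 + 7) := by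
  unfold bf_solve
  simp only [PySem.Str.len_eq, PySem.Str.pyGet?_eq, pvChGet]
  congr 1
  refine Eq.trans (List.foldl_ext _ (fun (tot i : Int) => tot +
      ((PySem.List.pyRange i ((s.toList.length : Int) + 1) 1).map (fun j =>
        if PySem.List.pyGet? s.toList (i - 1) = PySem.List.pyGet? s.toList (j - 1) then 0
        else (j - i) ^ 2)).sum) 0 ?_) ?_
  · intro tot i _
    refine Eq.trans (List.foldl_ext _ (fun (t : Int) j => t +
        (if PySem.List.pyGet? s.toList (i - 1) = PySem.List.pyGet? s.toList (j - 1) then 0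
         else (j - i) ^ 2)) tot ?_) ?_
    · intro t j _
      by_cases h : PySem.List.pyGet? s.toList (i - 1) = PySem.List.pyGet? s.toList (j - 1)
      · simp [h]
      · simp [h]
    · rw [PySem.List.foldl_add]
  · rw [PySem.List.foldl_add, zero_add]
    have hsplit : (PySem.List.pyRange 1 ((s.toList.length : Int) + 1) 1).map (fun i =>
          ((PySem.List.pyRange i ((s.toList.length : Int) + 1) 1).map (fun j =>
            if PySem.List.pyGet? s.toList (i - 1) = PySem.List.pyGet? s.toList (j - 1) then 0
            else (j - i) ^ 2)).sum)
        = (PySem.List.pyRange 1 ((s.toList.length : Int) + 1) 1).map (fun i =>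
          ((PySem.List.pyRange i ((s.toList.length : Int) + 1) 1).map (fun j => (j - i) ^ 2)).sum
          - ((PySem.List.pyRange i ((s.toList.length : Int) + 1) 1).map (fun j =>
            if PySem.List.pyGet? s.toList (i - 1) = PySem.List.pyGet? s.toList (j - 1)
            then (j - i) ^ 2 else 0)).sum) := by
      apply List.map_congr_left
      intro i _
      rw [← pvSumSub]
      apply congrArg
      apply List.map_congr_left
      intro j _
      split_ifs <;> ring
    rw [hsplit, pvSumSub]
    rfl

theorem pvBEq (s : String) :
    bf_solve_alt s
      = PySem.Int.mod (pvTotB (s.toList.length : Int) - pvEqT s.toList) (10 ^ 9 + 7) := by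
  unfold bf_solve_alt
  simp only [PySem.Str.len_eq]
  rw [PySem.List.foldl_add, zero_add, (pvFoldInv s.toList).2]
  rfl

theorem pvTotBEqAllT (n : Nat) : pvTotB (n : Int) = pvAllT (n : Int) := by
  have h1 := pvTwelveTotB n
  have h2 := pvTwelveAllT n
  omega

-- ===== VERDICT (by name: the statement is the Claim_ definition above) =====
theorem bf_solve_spec : Claim_equal_bf_solve := by
  intro s _
  unfold Spec_bf_solve
  rw [pvAEq, pvBEq]
  have h := pvTotBEqAllT s.toList.length
  rw [h]
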